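-- pv_equiv track=rewrite | github.com/MejbahUddinBhuiyan/Catch-The-Diamond | catchTheDiamond.py | convertToOriginal
-- ===== SOURCE A (Python) =====
-- def convertToOriginal(lst , zone ):
--      newList = []
--      for i in lst :
--           x, y = i[0], i[1]
--           if zone == 1:
--                newList.append([y, x])
--           elif zone == 2:
--                newList.append([-y, x])
--           elif zone == 3:
--                newList.append([-x, y])
--           elif zone == 4:
--                newList.append([-x, -y])
--           elif zone == 5:
--                newList.append([-y, -x])
--           elif zone == 6:
--                newList.append([y, -x])
--           elif zone == 7:
--                newList.append([x, -y])
--      return  newList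
-- ===== SOURCE B (Python) =====
-- def convertToOriginal(lst, zone):
--     # Each zone transform is an element of the dihedral group D4, decomposed as
--     # k applications of the 90-degree rotation R:(x,y)->(-y,x) followed
--     # optionally by the mirror M:(x,y)->(-x,y).  B applies these as staged
--     # whole-list passes instead of a per-element case transform.
--     params = {1: (1, True), 2: (1, False), 3: (0, True), 4: (2, False),
--               5: (3, True), 6: (3, False), 7: (2, True)}
--     if zone not in params:
--         return []
--     k, mirror = params[zone]
--     out = [[i[0], i[1]] for i in lst]
--     for _ in range(k):
--         out = [[-y, x] for x, y in out]
--     if mirror: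
--         out = [[-x, y] for x, y in out]
--     return out
-- ===== Notes on version B (the rewrite author's own statement) =====
-- stated objective: alternative
-- what changed: B decomposes each zone transform into dihedral-group generators (k whole-list 90-degree-rotation passes followed by an optional whole-list mirror pass) instead of applying a seven-way per-element case transform; unknown zones return [] before touching any element.
-- crash fix: On inputs containing an inner list of length < 2 with a zone outside 1..7, A raises IndexError (it unpacks i[0], i[1] before checking the zone) while B returns []. — e.g. on convertToOriginal([[]], 0): A raises IndexError, B returns []
import Mathlib
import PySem

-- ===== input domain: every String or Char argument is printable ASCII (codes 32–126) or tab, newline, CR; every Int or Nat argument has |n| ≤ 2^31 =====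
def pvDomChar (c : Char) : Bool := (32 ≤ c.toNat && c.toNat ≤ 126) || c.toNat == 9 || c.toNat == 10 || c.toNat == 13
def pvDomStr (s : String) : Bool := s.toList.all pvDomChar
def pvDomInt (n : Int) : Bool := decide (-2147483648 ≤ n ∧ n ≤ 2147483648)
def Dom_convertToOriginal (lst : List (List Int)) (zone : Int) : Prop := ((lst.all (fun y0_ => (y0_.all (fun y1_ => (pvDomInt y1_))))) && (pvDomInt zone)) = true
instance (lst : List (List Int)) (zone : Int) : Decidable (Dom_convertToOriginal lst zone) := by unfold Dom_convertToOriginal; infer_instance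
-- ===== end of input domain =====

-- B decomposes each zone transform into dihedral-group generators (k whole-list rotation
-- passes then an optional whole-list mirror pass) instead of a per-element case transform.
-- ===== PORT A =====
-- A raises IndexError on inner lists shorter than 2 (excluded by Pre_); the port uses a default 0 there, outside the claim.
def convertToOriginal (lst : List (List Int)) (zone : Int) : List (List Int) :=
  lst.foldl (fun newList i =>
    let x := PySem.List.pyGetD i 0 0
    let y := PySem.List.pyGetD i 1 0
    if zone = 1 then newList ++ [[y, x]]
    else if zone = 2 then newList ++ [[-y, x]]
    else if zone = 3 then newList ++ [[-x, y]]
    else if zone = 4 then newList ++ [[-x, -y]]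
    else if zone = 5 then newList ++ [[-y, -x]]
    else if zone = 6 then newList ++ [[y, -x]]
    else if zone = 7 then newList ++ [[x, -y]]
    else newList) []

-- ===== PORT B =====
def zoneParams (zone : Int) : Option (Nat × Bool) :=
  if zone = 1 then some (1, true)
  else if zone = 2 then some (1, false)
  else if zone = 3 then some (0, true)
  else if zone = 4 then some (2, false)
  else if zone = 5 then some (3, true)
  else if zone = 6 then some (3, false)
  else if zone = 7 then some (2, true)
  else none

-- one whole-list 90-degree rotation pass: (x, y) -> (-y, x)
def rotPass (out : List (List Int)) : List (List Int) :=
  out.map (fun p => [-(PySem.List.pyGetD p 1 0), PySem.List.pyGetD p 0 0])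

-- one whole-list mirror pass: (x, y) -> (-x, y)
def mirrorPass (out : List (List Int)) : List (List Int) :=
  out.map (fun p => [-(PySem.List.pyGetD p 0 0), PySem.List.pyGetD p 1 0])

def convertToOriginal_alt (lst : List (List Int)) (zone : Int) : List (List Int) :=
  match zoneParams zone with
  | none => []
  | some (k, mirror) =>
    let out := lst.map (fun i => [PySem.List.pyGetD i 0 0, PySem.List.pyGetD i 1 0])
    let out := (List.range k).foldl (fun acc _ => rotPass acc) out
    if mirror then mirrorPass out else out

-- ===== PRECONDITION & SPEC =====
-- Pre_ excludes exactly the inputs where A raises IndexError: any inner list shorter than 2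
-- (A unpacks i[0], i[1] for every element before checking the zone).
def Pre_convertToOriginal (lst : List (List Int)) (_zone : Int) : Prop :=
  ∀ i ∈ lst, 2 ≤ i.length
instance (lst : List (List Int)) (zone : Int) : Decidable (Pre_convertToOriginal lst zone) := by unfold Pre_convertToOriginal; infer_instance
def pvWitness_convertToOriginal : List (List Int) × Int := ([[1, 2], [3, 4]], 5)

-- On inputs with an inner list of length < 2 and a zone outside 1..7, A raises IndexError while B returns [].
def Raises_convertToOriginal (lst : List (List Int)) (zone : Int) : Prop :=
  (∃ i ∈ lst, i.length < 2) ∧ ¬(1 ≤ zone ∧ zone ≤ 7)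
instance (lst : List (List Int)) (zone : Int) : Decidable (Raises_convertToOriginal lst zone) := by unfold Raises_convertToOriginal; infer_instance
def pvRaiseWitness_convertToOriginal : List (List Int) × Int := ([[]], 0)
def pvRaiseWitnessOut_convertToOriginal : List (List Int) := []

def Spec_convertToOriginal (lst : List (List Int)) (zone : Int) (out : List (List Int)) : Prop := out = convertToOriginal_alt lst zone
instance (lst : List (List Int)) (zone : Int) (out : List (List Int)) : Decidable (Spec_convertToOriginal lst zone out) := by unfold Spec_convertToOriginal; infer_instance

-- ===== CLAIM (what is proved, stated in full; the proofs are below) =====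
def Claim_equal_convertToOriginal : Prop := ∀ (lst : List (List Int)) (zone : Int), Dom_convertToOriginal lst zone → Pre_convertToOriginal lst zone → Spec_convertToOriginal lst zone (convertToOriginal lst zone)
def Claim_raises_convertToOriginal : Prop := (∀ (lst : List (List Int)) (zone : Int), Dom_convertToOriginal lst zone → Raises_convertToOriginal lst zone → ¬ Pre_convertToOriginal lst zone) ∧ (Dom_convertToOriginal (pvRaiseWitness_convertToOriginal.1) (pvRaiseWitness_convertToOriginal.2) ∧ Raises_convertToOriginal (pvRaiseWitness_convertToOriginal.1) (pvRaiseWitness_convertToOriginal.2) ∧ convertToOriginal_alt (pvRaiseWitness_convertToOriginal.1) (pvRaiseWitness_convertToOriginal.2) = pvRaiseWitnessOut_convertToOriginal)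

-- ===== LEMMAS AND PROOFS =====
-- A's foldl-with-append over lst is the map of the per-element transform.
theorem foldl_append_map (g : List Int → List Int) (lst : List (List Int)) (acc : List (List Int)) :
    lst.foldl (fun newList i => newList ++ [g i]) acc = acc ++ lst.map g := by
  induction lst generalizing acc with
  | nil => simp [List.foldl]
  | cons h t ih => simp [List.foldl, ih]

-- ===== VERDICT (by name: the statement is the Claim_ definition above) =====
theorem convertToOriginal_spec : Claim_equal_convertToOriginal := by
  intro lst zone _ _
  unfold Spec_convertToOriginal convertToOriginal convertToOriginal_alt zoneParams
  by_cases h1 : zone = 1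
  · subst h1
    simp only [Int.reduceEq, reduceIte]
    rw [foldl_append_map (fun i => [PySem.List.pyGetD i 1 0, PySem.List.pyGetD i 0 0])]
    simp only [List.nil_append, List.range_succ, List.range_zero, List.foldl_cons, List.foldl_nil, rotPass, mirrorPass, List.map_map]
    try refine List.map_congr_left fun i _ => ?_
    try simp [Function.comp, PySem.List.pyGetD, PySem.List.pyGet?, PySem.List.pyIdx?]
  · 
    by_cases h2 : zone = 2
    · subst h2
      simp only [Int.reduceEq, reduceIte]
      rw [foldl_append_map (fun i => [-(PySem.List.pyGetD i 1 0), PySem.List.pyGetD i 0 0])]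
      simp only [List.nil_append, List.range_succ, List.range_zero, List.foldl_cons, List.foldl_nil, rotPass, mirrorPass, List.map_map]
      try refine List.map_congr_left fun i _ => ?_
      try simp [Function.comp, PySem.List.pyGetD, PySem.List.pyGet?, PySem.List.pyIdx?]
    · 
      by_cases h3 : zone = 3
      · subst h3
        simp only [Int.reduceEq, reduceIte]
        rw [foldl_append_map (fun i => [-(PySem.List.pyGetD i 0 0), PySem.List.pyGetD i 1 0])]
        simp only [List.nil_append, List.range_succ, List.range_zero, List.foldl_cons, List.foldl_nil, rotPass, mirrorPass, List.map_map]
        try refine List.map_congr_left fun i _ => ?_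
        try simp [Function.comp, PySem.List.pyGetD, PySem.List.pyGet?, PySem.List.pyIdx?]
      · 
        by_cases h4 : zone = 4
        · subst h4
          simp only [Int.reduceEq, reduceIte]
          rw [foldl_append_map (fun i => [-(PySem.List.pyGetD i 0 0), -(PySem.List.pyGetD i 1 0)])]
          simp only [List.nil_append, List.range_succ, List.range_zero, List.foldl_cons, List.foldl_nil, rotPass, mirrorPass, List.map_map]
          try refine List.map_congr_left fun i _ => ?_
          try simp [Function.comp, PySem.List.pyGetD, PySem.List.pyGet?, PySem.List.pyIdx?]
        · 
          by_cases h5 : zone = 5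
          · subst h5
            simp only [Int.reduceEq, reduceIte]
            rw [foldl_append_map (fun i => [-(PySem.List.pyGetD i 1 0), -(PySem.List.pyGetD i 0 0)])]
            simp only [List.nil_append, List.range_succ, List.range_zero, List.foldl_cons, List.foldl_nil, rotPass, mirrorPass, List.map_map]
            try refine List.map_congr_left fun i _ => ?_
            try simp [Function.comp, PySem.List.pyGetD, PySem.List.pyGet?, PySem.List.pyIdx?]
          · 
            by_cases h6 : zone = 6
            · subst h6
              simp only [Int.reduceEq, reduceIte]
              rw [foldl_append_map (fun i => [PySem.List.pyGetD i 1 0, -(PySem.List.pyGetD i 0 0)])]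
              simp only [List.nil_append, List.range_succ, List.range_zero, List.foldl_cons, List.foldl_nil, rotPass, mirrorPass, List.map_map]
              try refine List.map_congr_left fun i _ => ?_
              try simp [Function.comp, PySem.List.pyGetD, PySem.List.pyGet?, PySem.List.pyIdx?]
            · 
              by_cases h7 : zone = 7
              · subst h7
                simp only [Int.reduceEq, reduceIte]
                rw [foldl_append_map (fun i => [PySem.List.pyGetD i 0 0, -(PySem.List.pyGetD i 1 0)])]
                simp only [List.nil_append, List.range_succ, List.range_zero, List.foldl_cons, List.foldl_nil, rotPass, mirrorPass, List.map_map]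
                try refine List.map_congr_left fun i _ => ?_
                try simp [Function.comp, PySem.List.pyGetD, PySem.List.pyGet?, PySem.List.pyIdx?]
              · simp [h1, h2, h3, h4, h5, h6, h7]

@[simp] theorem convertToOriginal_raises : Claim_raises_convertToOriginal := by
  unfold Claim_raises_convertToOriginal
  refine ⟨?_, by decide⟩
  intro lst zone _ hr hpre
  obtain ⟨⟨i, hi, hlen⟩, _⟩ := hr
  exact absurd (hpre i hi) (by omega)
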